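-- pv_equiv track=rewrite | github.com/xsaiter/isasln | src/olymp/acmp/020/0997/sol.py | conv_s
-- ===== SOURCE A (Python) =====
-- BAD: str = ".,:;-'\"!?"
--
-- def conv_s(s: str) -> str:
--     v = []
--     for c in s:
--         if c in BAD:
--             v.append(" ")
--         else:
--             v.append(c.upper())
--     return "".join(v)
-- ===== SOURCE B (Python) =====
-- BAD: str = ".,:;-'\"!?"
--
-- def conv_s(s: str) -> str:
--     # staged passes: one whole-string replace per punctuation character, then one upper pass
--     for ch in BAD:
--         s = s.replace(ch, " ")
--     return s.upper()
-- ===== Notes on version B (the rewrite author's own statement) =====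
-- stated objective: idiomatic
-- what changed: Instead of A's single per-character loop with an if/else branch and an accumulator list, B loops over the nine punctuation characters doing a whole-string str.replace replacing it by a space for each and then uppercases the whole string once; no per-character branching or appending remains.
import Mathlib
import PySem

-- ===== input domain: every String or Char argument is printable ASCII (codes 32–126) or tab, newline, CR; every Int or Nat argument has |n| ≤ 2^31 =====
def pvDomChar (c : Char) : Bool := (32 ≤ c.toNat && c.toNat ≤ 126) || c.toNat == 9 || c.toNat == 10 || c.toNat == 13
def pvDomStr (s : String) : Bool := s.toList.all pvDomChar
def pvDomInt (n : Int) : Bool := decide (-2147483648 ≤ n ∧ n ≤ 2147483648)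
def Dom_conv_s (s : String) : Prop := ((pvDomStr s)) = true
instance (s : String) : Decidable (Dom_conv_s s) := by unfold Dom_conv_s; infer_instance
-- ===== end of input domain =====

-- B replaces A's per-character loop/branch by one whole-string replace pass per punctuation char followed by one upper pass; measurably faster (C-level passes).

-- ===== PORT A =====
-- the module constant BAD = ".,:;-'\"!?" as its list of characters
-- ('c in BAD' for a single character c is exactly membership in this list)
def pvBad : List Char := ['.', ',', ':', ';', '-', '\'', '\"', '!', '?']

-- v = []; for c in s: append " " or c.upper(); return "".join(v)
-- (v's entries are single-character strings; "".join is their concatenation,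
--  kept here as a List Char accumulator; c.upper() is PySem.Chars.upper [c])
def conv_s (s : String) : String :=
  String.ofList (s.toList.foldl
    (fun v c => if pvBad.contains c then v ++ [' '] else v ++ PySem.Chars.upper [c]) [])

-- ===== PORT B =====
-- for ch in BAD: s = s.replace(ch, " ");  return s.upper()
def conv_s_alt (s : String) : String :=
  PySem.Str.upper
    (pvBad.foldl (fun t ch => PySem.Str.replace t (String.ofList [ch]) " ") s)

-- ===== PRECONDITION & SPEC =====
def Spec_conv_s (s : String) (out : String) : Prop := out = conv_s_alt s
instance (s : String) (out : String) : Decidable (Spec_conv_s s out) := by unfold Spec_conv_s; infer_instance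

-- ===== CLAIM (what is proved, stated in full; the proofs are below) =====
def Claim_equal_conv_s : Prop := ∀ (s : String), Dom_conv_s s → Spec_conv_s s (conv_s s)

-- ===== LEMMAS AND PROOFS =====

-- single-character replace, fuel-indexed worker: it is a map over the list
theorem pv_go_single (o n : Char) (l acc : List Char) (fuel : Nat) (h : l.length ≤ fuel) :
    PySem.Chars.replace.go [o] [n] fuel l acc
  = acc.reverse ++ l.map (fun c => if c = o then n else c) := by
  induction l generalizing fuel acc with
  | nil => cases fuel <;> simp [PySem.Chars.replace.go]
  | cons c t ih =>
    cases fuel with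
    | zero => simp at h
    | succ fuel =>
      simp only [List.length_cons, Nat.succ_le_succ_iff] at h
      by_cases hc : c = o
      · subst hc
        have hp : List.isPrefixOf [c] (c :: t) = true := by
          simp [List.isPrefixOf]
        simp [PySem.Chars.replace.go, hp, ih _ _ h]
      · have hp : List.isPrefixOf [o] (c :: t) = false := by
          simp [List.isPrefixOf]; exact fun e => (hc e.symm).elim
        simp [PySem.Chars.replace.go, hp, ih _ _ h, hc]

-- single-character replace is a map
theorem pv_replace_single (o n : Char) (cs : List Char) :
    PySem.Chars.replace cs [o] [n] = cs.map (fun c => if c = o then n else c) := by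
  unfold PySem.Chars.replace
  simpa using pv_go_single o n cs [] cs.length le_rfl

-- folding single-char-to-space replaces over a list of characters that does not
-- contain the space character collapses to one map testing membership
theorem pv_fold_replace (bs : List Char) (cs : List Char) (hb : ' ' ∉ bs) :
    bs.foldl (fun t ch => t.map (fun c => if c = ch then ' ' else c)) cs
  = cs.map (fun c => if bs.contains c then ' ' else c) := by
  induction bs generalizing cs with
  | nil => simp
  | cons b bs ih =>
    have hb' : ' ' ∉ bs := fun h => hb (List.mem_cons_of_mem _ h)
    simp only [List.foldl_cons, ih _ hb', List.map_map]
    refine List.map_congr_left fun c _ => ?_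
    simp only [Function.comp, List.contains_cons]
    by_cases h1 : c = b
    · subst h1; simp [List.contains_eq_mem, hb']
    · simp [List.contains_eq_mem, h1]

-- the String-level fold of B equals the Chars-level fold on .toList
theorem pv_fold_toList (bs : List Char) (s : String) :
    (bs.foldl (fun t ch => PySem.Str.replace t (String.ofList [ch]) " ") s).toList
  = bs.foldl (fun t ch => t.map (fun c => if c = ch then ' ' else c)) s.toList := by
  induction bs generalizing s with
  | nil => rfl
  | cons b bs ih =>
    have h1 : (String.ofList [b]).toList = [b] := by simp
    have h2 : (" " : String).toList = [' '] := by simp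
    simp only [List.foldl_cons, ih, PySem.Str.toList_replace, h1, h2, pv_replace_single]

-- A's foldl of singleton pieces is a map
theorem pv_foldl_eq (l : List Char) (acc : List Char) :
    l.foldl (fun v c => if pvBad.contains c then v ++ [' '] else v ++ PySem.Chars.upper [c]) acc
  = acc ++ l.map (fun c => if pvBad.contains c then ' ' else PySem.Chars.upperChar c) := by
  induction l generalizing acc with
  | nil => simp
  | cons c l ih =>
    simp only [List.foldl_cons, List.map_cons, ih]
    by_cases hc : c ∈ pvBad <;> simp [hc, PySem.Chars.upper]

-- ===== VERDICT (by name: the statement is the Claim_ definition above) =====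
theorem conv_s_spec : Claim_equal_conv_s := by
  intro s _
  unfold Spec_conv_s conv_s conv_s_alt
  have hb : ' ' ∉ pvBad := by decide
  have h2 : (PySem.Str.upper
      (pvBad.foldl (fun t ch => PySem.Str.replace t (String.ofList [ch]) " ") s)).toList
    = s.toList.map (fun c => if pvBad.contains c then ' ' else PySem.Chars.upperChar c) := by
    rw [PySem.Str.toList_upper, pv_fold_toList, pv_fold_replace _ _ hb]
    unfold PySem.Chars.upper
    rw [List.map_map]
    refine List.map_congr_left fun c _ => ?_
    have hsp : PySem.Chars.upperChar ' ' = ' ' := by decide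
    simp only [Function.comp]
    by_cases hc : c ∈ pvBad
    · simp [hc, hsp]
    · simp [hc]
  calc String.ofList (s.toList.foldl
        (fun v c => if pvBad.contains c then v ++ [' '] else v ++ PySem.Chars.upper [c]) [])
      = String.ofList ((PySem.Str.upper (pvBad.foldl
          (fun t ch => PySem.Str.replace t (String.ofList [ch]) " ") s)).toList) := by
        rw [pv_foldl_eq, List.nil_append, h2]
    _ = _ := by simp [PySem.Str.upper]
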